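-- pv_equiv track=rewrite | github.com/NextGEN-Organization/terminal-selfbot | commands/test.py | escape_space
-- ===== SOURCE A (Python) =====
-- def escape_space(string):
--     out = ""
--     quote = False
--     for letter in string:
--         quote = (quote != (letter == "\""))  # quote <- quote XOR letter is "
--         if quote and letter == " ":
--             letter = "\s"
--         out += letter
--     return out
-- ===== SOURCE B (Python) =====
-- def escape_space(string):
--     parts = string.split('"')
--     return '"'.join(p.replace(' ', '\\s') if i % 2 else p
--                     for i, p in enumerate(parts))
-- ===== Notes on version B (the rewrite author's own statement) =====
-- stated objective: faster
-- what changed: Replaces the character-by-character XOR-toggle loop with string += accumulation by splitting on the quote character, replacing spaces in the odd-indexed (inside-quotes) segments via str.replace, and rejoining.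
import Mathlib
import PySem

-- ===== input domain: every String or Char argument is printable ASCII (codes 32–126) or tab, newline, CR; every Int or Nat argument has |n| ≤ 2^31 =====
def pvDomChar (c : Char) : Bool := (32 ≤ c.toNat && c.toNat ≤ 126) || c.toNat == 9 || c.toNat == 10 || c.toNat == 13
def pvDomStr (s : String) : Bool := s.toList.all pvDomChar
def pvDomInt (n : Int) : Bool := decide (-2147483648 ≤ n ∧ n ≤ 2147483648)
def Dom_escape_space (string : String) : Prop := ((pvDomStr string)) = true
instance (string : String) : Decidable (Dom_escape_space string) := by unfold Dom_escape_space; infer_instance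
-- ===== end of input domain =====

-- B replaces A's per-character quote-toggle loop by an idiomatic split-on-'"' /
-- replace-in-odd-segments / rejoin decomposition; return values are proved equal on all inputs.

-- ===== PORT A =====
def escape_space (string : String) : String :=
  -- out = ""; quote = False; for letter in string: …
  String.ofList ((string.toList.foldl
    (fun (st : List Char × Bool) letter =>
      let quote := st.2 != (letter == '"')
      let l := if quote && letter == ' ' then ['\\', 's'] else [letter]
      (st.1 ++ l, quote))
    ([], false)).1)

-- ===== PORT B =====
def escape_space_alt (string : String) : String :=
  let parts := PySem.Chars.splitOn string.toList ['"']
  String.ofList (PySem.Chars.join ['"']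
    ((PySem.List.enumerate parts).map
      (fun ip => if PySem.Int.mod ip.1 2 != 0
                 then PySem.Chars.replace ip.2 [' '] ['\\', 's']
                 else ip.2)))

-- ===== PRECONDITION & SPEC =====
def Spec_escape_space (string : String) (out : String) : Prop := out = escape_space_alt string
instance (string : String) (out : String) : Decidable (Spec_escape_space string out) := by unfold Spec_escape_space; infer_instance

-- ===== CLAIM (what is proved, stated in full; the proofs are below) =====
def Claim_equal_escape_space : Prop := ∀ (string : String), Dom_escape_space string → Spec_escape_space string (escape_space string)

-- ===== LEMMAS AND PROOFS =====

-- the common specification: output of the escaping, given the current quote parity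
def pvEsc : Bool → List Char → List Char
  | _, [] => []
  | q, c :: cs =>
    let q' := q != (c == '"')
    (if q' && c == ' ' then ['\\', 's'] else [c]) ++ pvEsc q' cs

-- structural form of splitting on '"': (first segment, remaining segments)
def pvSplitQ : List Char → List Char × List (List Char)
  | [] => ([], [])
  | c :: cs =>
    if c == '"' then ([], (pvSplitQ cs).1 :: (pvSplitQ cs).2)
    else (c :: (pvSplitQ cs).1, (pvSplitQ cs).2)

-- space replacement as a flatMap
def pvRep (p : List Char) : List Char :=
  p.flatMap (fun c => if c == ' ' then ['\\', 's'] else [c])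

-- alternate: replace spaces in every other segment, starting with parity q
def pvAltMap : Bool → List (List Char) → List (List Char)
  | _, [] => []
  | q, p :: ps => (if q then pvRep p else p) :: pvAltMap (!q) ps

-- A's loop computes pvEsc
theorem pvA_foldl (cs : List Char) (acc : List Char) (q : Bool) :
    (cs.foldl
      (fun (st : List Char × Bool) letter =>
        let quote := st.2 != (letter == '"')
        let l := if quote && letter == ' ' then ['\\', 's'] else [letter]
        (st.1 ++ l, quote))
      (acc, q)).1 = acc ++ pvEsc q cs := by
  induction cs generalizing acc q with
  | nil => simp [pvEsc]
  | cons c cs ih =>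
    simp only [List.foldl_cons]
    refine (ih _ _).trans ?_
    simp [pvEsc, List.append_assoc]

-- splitOn.go on a single-character separator, with enough fuel
theorem pvSplitOn_go (cs : List Char) (fuel : Nat) (cur : List Char)
    (acc : List (List Char)) (hf : cs.length ≤ fuel) :
    PySem.Chars.splitOn.go ['"'] fuel cs cur acc =
      acc.reverse ++ ((cur.reverse ++ (pvSplitQ cs).1) :: (pvSplitQ cs).2) := by
  induction cs generalizing fuel cur acc with
  | nil =>
    cases fuel <;> simp [PySem.Chars.splitOn.go, pvSplitQ]
  | cons c cs ih =>
    cases fuel with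
    | zero => simp at hf
    | succ fuel =>
      simp only [List.length_cons, Nat.succ_le_succ_iff] at hf
      by_cases hc : c = '"'
      · subst hc
        rw [show PySem.Chars.splitOn.go ['"'] (fuel+1) ('"' :: cs) cur acc =
            PySem.Chars.splitOn.go ['"'] fuel cs [] (cur.reverse :: acc) from by
          simp [PySem.Chars.splitOn.go, List.isPrefixOf]]
        rw [ih fuel [] _ hf]
        simp [pvSplitQ]
      · rw [show PySem.Chars.splitOn.go ['"'] (fuel+1) (c :: cs) cur acc =
            PySem.Chars.splitOn.go ['"'] fuel cs (c :: cur) acc from by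
          simp [PySem.Chars.splitOn.go, List.isPrefixOf, Ne.symm hc]]
        rw [ih fuel (c :: cur) _ hf]
        simp [pvSplitQ, hc]

theorem pvSplitOn_eq (cs : List Char) :
    PySem.Chars.splitOn cs ['"'] = (pvSplitQ cs).1 :: (pvSplitQ cs).2 := by
  unfold PySem.Chars.splitOn
  rw [pvSplitOn_go cs (cs.length + 1) [] [] (by omega)]
  simp

-- replace.go with old = [' ']
theorem pvReplace_go (cs : List Char) (fuel : Nat) (acc : List Char)
    (hf : cs.length ≤ fuel) :
    PySem.Chars.replace.go [' '] ['\\', 's'] fuel cs acc = acc.reverse ++ pvRep cs := by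
  induction cs generalizing fuel acc with
  | nil => cases fuel <;> simp [PySem.Chars.replace.go, pvRep]
  | cons c cs ih =>
    cases fuel with
    | zero => simp at hf
    | succ fuel =>
      simp only [List.length_cons, Nat.succ_le_succ_iff] at hf
      by_cases hc : c = ' '
      · subst hc
        rw [show PySem.Chars.replace.go [' '] ['\\', 's'] (fuel+1) (' ' :: cs) acc =
            PySem.Chars.replace.go [' '] ['\\', 's'] fuel cs (['\\','s'].reverse ++ acc) from by
          simp [PySem.Chars.replace.go, List.isPrefixOf]]
        rw [ih fuel _ hf]
        simp [pvRep]
      · rw [show PySem.Chars.replace.go [' '] ['\\', 's'] (fuel+1) (c :: cs) acc =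
            PySem.Chars.replace.go [' '] ['\\', 's'] fuel cs (c :: acc) from by
          simp [PySem.Chars.replace.go, List.isPrefixOf, Ne.symm hc]]
        rw [ih fuel _ hf]
        simp [pvRep, hc]

theorem pvReplace_eq (cs : List Char) :
    PySem.Chars.replace cs [' '] ['\\', 's'] = pvRep cs := by
  unfold PySem.Chars.replace
  rw [if_neg (by simp), pvReplace_go cs cs.length [] le_rfl]
  simp

-- the enumerate-based parity map is pvAltMap
theorem pvEnum_altMap (parts : List (List Char)) (i : Int) :
    (PySem.List.enumerate parts i).map
      (fun ip => if PySem.Int.mod ip.1 2 != 0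
                 then PySem.Chars.replace ip.2 [' '] ['\\', 's']
                 else ip.2)
      = pvAltMap (PySem.Int.mod i 2 != 0) parts := by
  induction parts generalizing i with
  | nil => simp [PySem.List.enumerate_nil, pvAltMap]
  | cons p ps ih =>
    rw [PySem.List.enumerate_cons, List.map_cons, ih (i + 1)]
    have h2 : PySem.Int.mod i 2 = i % 2 := PySem.Int.mod_eq_emod_of_pos (by omega)
    have h2' : PySem.Int.mod (i + 1) 2 = (i + 1) % 2 := PySem.Int.mod_eq_emod_of_pos (by omega)
    have hflip : ((i + 1) % 2 != 0) = !(i % 2 != 0) := by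
      rcases Int.emod_two_eq i with h | h <;> simp [h] <;> omega
    rw [pvAltMap, h2, h2', hflip, pvReplace_eq]

-- the joined alternating map of the split equals pvEsc
theorem pvJoin_cons_cons (sep x y : List Char) (xs : List (List Char)) :
    PySem.Chars.join sep (x :: y :: xs) = x ++ sep ++ PySem.Chars.join sep (y :: xs) := by
  simp [PySem.Chars.join, List.intercalate, List.intersperse]

theorem pvJoin_head_append (sep pre x : List Char) (xs : List (List Char)) :
    PySem.Chars.join sep ((pre ++ x) :: xs) = pre ++ PySem.Chars.join sep (x :: xs) := by
  cases xs <;> simp [PySem.Chars.join, List.intercalate, List.intersperse]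

-- the joined alternating map of the split equals pvEsc
theorem pvJoin_altMap (cs : List Char) (q : Bool) :
    PySem.Chars.join ['"']
      ((if q then pvRep (pvSplitQ cs).1 else (pvSplitQ cs).1) ::
        pvAltMap (!q) (pvSplitQ cs).2) = pvEsc q cs := by
  induction cs generalizing q with
  | nil => cases q <;> rfl
  | cons c cs ih =>
    by_cases hc : c = '"'
    · subst hc
      have hs1 : (pvSplitQ ('"' :: cs)).1 = [] := by simp [pvSplitQ]
      have hs2 : (pvSplitQ ('"' :: cs)).2 = (pvSplitQ cs).1 :: (pvSplitQ cs).2 := by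
        simp [pvSplitQ]
      have hih := ih (!q)
      rw [Bool.not_not] at hih
      rw [hs1, hs2, pvAltMap, Bool.not_not,
        show (if q then pvRep [] else []) = ([] : List Char) from by cases q <;> rfl,
        pvJoin_cons_cons, hih]
      simp [pvEsc]
    · have hs1 : (pvSplitQ (c :: cs)).1 = c :: (pvSplitQ cs).1 := by simp [pvSplitQ, hc]
      have hs2 : (pvSplitQ (c :: cs)).2 = (pvSplitQ cs).2 := by simp [pvSplitQ, hc]
      have hhead : (if q then pvRep (c :: (pvSplitQ cs).1) else c :: (pvSplitQ cs).1)
          = (if q && c == ' ' then ['\\', 's'] else [c]) ++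
            (if q then pvRep (pvSplitQ cs).1 else (pvSplitQ cs).1) := by
        cases q <;> simp [pvRep]
      have hcb : (c == '"') = false := by simp [hc]
      rw [hs1, hs2, hhead, pvJoin_head_append, ih q]
      simp [pvEsc, hcb]

-- ===== VERDICT (by name: the statement is the Claim_ definition above) =====
theorem escape_space_spec : Claim_equal_escape_space := by
  intro s _
  unfold Spec_escape_space escape_space escape_space_alt
  rw [pvA_foldl s.toList [] false]
  show _ = String.ofList (PySem.Chars.join ['"']
    ((PySem.List.enumerate (PySem.Chars.splitOn s.toList ['"'])).map
      (fun ip => if PySem.Int.mod ip.1 2 != 0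
                 then PySem.Chars.replace ip.2 [' '] ['\\', 's']
                 else ip.2)))
  rw [pvSplitOn_eq, pvEnum_altMap _ 0,
    show (PySem.Int.mod 0 2 != 0) = false from by decide,
    show pvAltMap false ((pvSplitQ s.toList).1 :: (pvSplitQ s.toList).2)
      = (if false then pvRep (pvSplitQ s.toList).1 else (pvSplitQ s.toList).1) ::
          pvAltMap (!false) (pvSplitQ s.toList).2 from rfl,
    pvJoin_altMap s.toList false]
  simp
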